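-- pv_equiv track=rewrite | github.com/907riley/CPSC322-Disc-Golf-Project | Flask app/mysklearn/pokemonDiscretizers.py | base_total_discretizer
-- ===== SOURCE A (Python) =====
-- def base_total_discretizer(x):
--     """Runs a list of bast_total values through a discretizer
--        [180.0, 288.0, 396.0, 504.0, 612.0, 720.0]
--     Args:
--         x (list): the list of values to discretize
--     Returns:
--         classification: The list of discretizied values
--     """
--     classification = []
--     for val in x:
--         if val > 612:
--             classification.append(5)
--         elif val > 504:
--             classification.append(4)
--         elif val > 396:
--             classification.append(3)
--         elif val > 288:
--             classification.append(2)
--         else: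
--             classification.append(1)
--     return classification
-- ===== SOURCE B (Python) =====
-- import bisect
--
-- _THRESHOLDS = [288, 396, 504, 612]
--
-- def base_total_discretizer(x):
--     """Discretize by counting how many thresholds are strictly below each value."""
--     return [bisect.bisect_left(_THRESHOLDS, val) + 1 for val in x]
-- ===== Notes on version B (the rewrite author's own statement) =====
-- stated objective: idiomatic
-- what changed: Replaces the per-element descending if-elif comparison chain and append loop with a single list comprehension that binary-searches a sorted threshold table (bisect_left counts thresholds strictly below the value).
import Mathlib
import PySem

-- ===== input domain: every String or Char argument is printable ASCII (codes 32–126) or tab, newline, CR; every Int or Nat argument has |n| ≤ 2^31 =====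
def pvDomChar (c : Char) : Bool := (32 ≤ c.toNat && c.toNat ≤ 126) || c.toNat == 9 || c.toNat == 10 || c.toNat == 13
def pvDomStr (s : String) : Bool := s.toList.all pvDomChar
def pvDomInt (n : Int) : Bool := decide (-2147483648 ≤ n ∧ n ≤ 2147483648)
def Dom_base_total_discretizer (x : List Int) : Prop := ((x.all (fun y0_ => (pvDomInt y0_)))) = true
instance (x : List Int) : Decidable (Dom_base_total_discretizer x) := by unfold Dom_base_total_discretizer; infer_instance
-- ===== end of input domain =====

-- B replaces A's descending if-elif chain with a binary search (bisect_left) over a sorted threshold table; objective: idiomatic.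


-- ===== PORT A =====
-- literal port of A: loop over x, descending if-elif chain, append to the accumulator
def base_total_discretizer (x : List Int) : List Int :=
  x.foldl (fun classification val =>
    if val > 612 then classification ++ [5]
    else if val > 504 then classification ++ [4]
    else if val > 396 then classification ++ [3]
    else if val > 288 then classification ++ [2]
    else classification ++ [1]) []

-- ===== PORT B =====
-- literal port of Source B: bisect_left on a sorted list counts elements strictly below val
def pvThresholds : List Int := [288, 396, 504, 612]

def base_total_discretizer_alt (x : List Int) : List Int :=
  x.map (fun val => (pvThresholds.countP (fun t => t < val) : Int) + 1)

-- ===== PRECONDITION & SPEC =====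
def Spec_base_total_discretizer (x : List Int) (out : List Int) : Prop := out = base_total_discretizer_alt x
instance (x : List Int) (out : List Int) : Decidable (Spec_base_total_discretizer x out) := by unfold Spec_base_total_discretizer; infer_instance

-- ===== CLAIM (what is proved, stated in full; the proofs are below) =====
def Claim_equal_base_total_discretizer : Prop := ∀ (x : List Int), Dom_base_total_discretizer x → Spec_base_total_discretizer x (base_total_discretizer x)

-- ===== LEMMAS AND PROOFS =====
-- per-element agreement of the chain with the threshold count
theorem pv_elem_eq (val : Int) :
    (if val > 612 then (5 : Int)
     else if val > 504 then 4
     else if val > 396 then 3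
     else if val > 288 then 2
     else 1) = (pvThresholds.countP (fun t => t < val) : Int) + 1 := by
  simp only [pvThresholds, List.countP_cons, List.countP_nil]
  split_ifs with h1 h2 h3 h4 <;>
    simp_all [decide_eq_true_eq] <;> omega

-- A's foldl with explicit accumulator produces acc ++ map
theorem pv_fold_eq (x : List Int) (acc : List Int) :
    x.foldl (fun classification val =>
      if val > 612 then classification ++ [5]
      else if val > 504 then classification ++ [4]
      else if val > 396 then classification ++ [3]
      else if val > 288 then classification ++ [2]
      else classification ++ [1]) acc
    = acc ++ x.map (fun val => (pvThresholds.countP (fun t => t < val) : Int) + 1) := by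
  induction x generalizing acc with
  | nil => simp
  | cons v xs ih =>
    simp only [List.foldl_cons, List.map_cons, ih]
    have h := pv_elem_eq v
    split_ifs at h ⊢ <;> simp [← h]

-- ===== VERDICT (by name: the statement is the Claim_ definition above) =====
theorem base_total_discretizer_spec : Claim_equal_base_total_discretizer := by
  intro x _
  unfold Spec_base_total_discretizer base_total_discretizer base_total_discretizer_alt
  exact pv_fold_eq x []
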